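-- pv_equiv track=rewrite | github.com/Excape/adventofcode | day9/day9.py | find_basins
-- ===== SOURCE A (Python) =====
-- directions = [(-1, 0), (1, 0), (0, 1), (0, -1)]  # left, right, up, down
--
-- def find_lowest_points(input):
--     visited = []
--     lowest_points = []
--
--     for y, row in enumerate(input):
--         for x, n in enumerate(row):
--             if (x, y) in visited:
--                 continue
--             if all(
--                 check_neighbors(x, y, dx, dy, n, input, visited)
--                 for dx, dy in directions
--             ):
--                 lowest_points.append((x, y))
--     return lowest_points
--
-- def check_neighbors(x, y, dx, dy, n, input, visited):
--     x2, y2 = x + dx, y + dy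
--     if not check_bounds(x2, y2, input):
--         return True
--     if input[y2][x2] > n:
--         visited.append((x2, y2))
--         return True
--     return False
--
-- def check_bounds(x, y, input):
--     return x >= 0 and y >= 0 and y < len(input) and x < len(input[y])
--
-- def find_basins(input):
--     lowest_points = find_lowest_points(input)
--     basins = []
--     for p in lowest_points:
--         basin = [p]
--         expand_basin(p, basin, input)
--         basins.append(basin)
--     return basins
--
-- def expand_basin(p, basin, input):
--     x, y = p
--     for dx, dy in directions:
--         x2, y2 = x + dx, y + dy
--         if not check_bounds(x2, y2, input):
--             continue
--         if (x2, y2) in basin or input[y2][x2] == 9: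
--             continue
--         if input[y2][x2] > input[y][x]:
--             basin.append((x2, y2))
--             expand_basin((x2, y2), basin, input)
-- ===== SOURCE B (Python) =====
-- DIRECTIONS = [(-1, 0), (1, 0), (0, 1), (0, -1)]  # same scan order as the puzzle
--
-- def find_basins(input):
--     def in_bounds(x, y):
--         return 0 <= y < len(input) and 0 <= x < len(input[y])
--
--     lowest_points = [
--         (x, y)
--         for y, row in enumerate(input)
--         for x, n in enumerate(row)
--         if all(not in_bounds(x + dx, y + dy) or input[y + dy][x + dx] > n
--                for dx, dy in DIRECTIONS)
--     ]
--
--     def grow(p):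
--         basin = [p]
--         stack = [(p, list(DIRECTIONS))]  # frame = (cell, remaining directions)
--         while stack:
--             (x, y), remaining = stack[-1]
--             if not remaining:
--                 stack.pop()
--                 continue
--             dx, dy = remaining.pop(0)
--             q = (x + dx, y + dy)
--             if (in_bounds(q[0], q[1]) and q not in basin
--                     and input[q[1]][q[0]] != 9
--                     and input[q[1]][q[0]] > input[y][x]):
--                 basin.append(q)
--                 stack.append((q, list(DIRECTIONS)))
--         return basin
--
--     return [grow(p) for p in lowest_points]
-- ===== Notes on version B (the rewrite author's own statement) =====
-- stated objective: faster
-- what changed: B finds low points with a direct all-neighbours test (dropping A's quadratically-growing shared 'visited' list, which never affects the result) and replaces the recursive expand_basin with an explicit stack of (cell, remaining-directions) frames that simulates the call stack, preserving the exact append order of each basin.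
import Mathlib
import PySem

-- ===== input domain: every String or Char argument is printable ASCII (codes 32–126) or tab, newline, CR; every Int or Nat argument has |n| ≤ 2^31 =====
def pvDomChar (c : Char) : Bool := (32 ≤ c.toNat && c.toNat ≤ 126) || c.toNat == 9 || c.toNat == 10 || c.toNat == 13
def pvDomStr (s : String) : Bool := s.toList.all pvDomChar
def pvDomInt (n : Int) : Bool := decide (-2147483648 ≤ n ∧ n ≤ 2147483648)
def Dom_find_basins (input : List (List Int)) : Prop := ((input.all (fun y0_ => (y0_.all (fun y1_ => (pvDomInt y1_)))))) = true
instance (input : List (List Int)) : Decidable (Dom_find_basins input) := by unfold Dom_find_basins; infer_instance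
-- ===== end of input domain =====

-- B replaces A's recursive basin expansion by an explicit stack of (cell, remaining-directions)
-- frames and drops A's shared `visited` list from the low-point scan (it never changes the result);
-- objective: simpler/faster low-point pass, same exact output order.

-- shared helpers (grid geometry used by both ports)
def dirsA : List (Int × Int) := [(-1, 0), (1, 0), (0, 1), (0, -1)]

def gridAt (input : List (List Int)) (x y : Int) : Int :=
  (input.getD y.toNat []).getD x.toNat 0
-- exact for Python's input[y][x]: only evaluated under check_bounds (0 ≤ x, 0 ≤ y, in range)

def check_bounds (x y : Int) (input : List (List Int)) : Bool :=
  decide (0 ≤ x) && decide (0 ≤ y) && decide (y < (input.length : Int)) &&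
    decide (x < ((input.getD y.toNat []).length : Int))

-- all in-bounds coordinates (x, y); used only for the fuel/termination measure
def allCells (input : List (List Int)) : List (Int × Int) :=
  (PySem.List.enumerate input).flatMap (fun r =>
    (PySem.List.enumerate r.2).map (fun c => (c.1, r.1)))

def freeCells (input : List (List Int)) (b : List (Int × Int)) : Nat :=
  ((allCells input).filter (fun q => q ∉ b)).length

theorem mem_allCells (input : List (List Int)) (q : Int × Int)
    (h : check_bounds q.1 q.2 input = true) : q ∈ allCells input := by
  obtain ⟨x, y⟩ := q
  simp only [check_bounds, Bool.and_eq_true, decide_eq_true_eq] at h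
  obtain ⟨⟨⟨hx0, hy0⟩, hyl⟩, hxl⟩ := h
  have hy : y.toNat < input.length := by omega
  have hrow : input.getD y.toNat [] = input[y.toNat] := List.getD_eq_getElem _ _ hy
  rw [hrow] at hxl
  have hx : x.toNat < input[y.toNat].length := by omega
  simp only [allCells, List.mem_flatMap]
  refine ⟨(y, input[y.toNat]), ?_, ?_⟩
  · rw [PySem.List.mem_enumerate_iff]
    exact ⟨y.toNat, hy, by simp [Int.toNat_of_nonneg hy0]⟩
  · simp only [List.mem_map]
    refine ⟨(x, input[y.toNat][x.toNat]), ?_, by simp⟩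
    rw [PySem.List.mem_enumerate_iff]
    exact ⟨x.toNat, hx, by simp [Int.toNat_of_nonneg hx0]⟩

theorem freeCells_append_lt (input : List (List Int)) (q : Int × Int) (b : List (Int × Int))
    (h1 : check_bounds q.1 q.2 input = true) (h2 : q ∉ b) :
    freeCells input (b ++ [q]) < freeCells input b := by
  have hq : q ∈ allCells input := mem_allCells input q h1
  unfold freeCells
  have hsplit : (allCells input).filter (fun z => decide (z ∉ b ++ [q]))
      = ((allCells input).filter (fun z => decide (z ∉ b))).filter (fun z => decide (z ≠ q)) := by
    rw [List.filter_filter]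
    apply List.filter_congr
    intro z _
    by_cases hzb : z ∈ b <;> by_cases hzq : z = q <;> simp [hzb, hzq]
  rw [hsplit]
  apply List.length_filter_lt_length_iff_exists.mpr
  exact ⟨q, List.mem_filter.mpr ⟨hq, by simp [h2]⟩, by simp⟩

-- recursion-depth bound for A's expand_basin (the basin only ever gains distinct in-bounds cells)
def pvFuel (input : List (List Int)) : Nat := (allCells input).length + 1

-- ===== PORT A =====
def check_neighbors (x y dx dy n : Int) (input : List (List Int))
    (visited : List (Int × Int)) : Bool × List (Int × Int) :=
  let x2 := x + dx
  let y2 := y + dy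
  if check_bounds x2 y2 input = false then (true, visited)
  else if gridAt input x2 y2 > n then (true, visited ++ [(x2, y2)])
  else (false, visited)

-- the short-circuiting all(check_neighbors(...) for dx, dy in directions)
def allCheck (x y n : Int) (input : List (List Int)) :
    List (Int × Int) → List (Int × Int) → Bool × List (Int × Int)
  | [], visited => (true, visited)
  | d :: ds, visited =>
    let r := check_neighbors x y d.1 d.2 n input visited
    if r.1 then allCheck x y n input ds r.2 else (false, r.2)

def cellStep (input : List (List Int)) (y : Int)
    (st : List (Int × Int) × List (Int × Int)) (c : Int × Int) :
    List (Int × Int) × List (Int × Int) :=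
  if (c.1, y) ∈ st.1 then st
  else
    let r := allCheck c.1 y c.2 input dirsA st.1
    if r.1 then (r.2, st.2 ++ [(c.1, y)]) else (r.2, st.2)

def find_lowest_points (input : List (List Int)) : List (Int × Int) :=
  ((PySem.List.enumerate input).foldl
    (fun st r => (PySem.List.enumerate r.2).foldl (cellStep input r.1) st)
    ([], [])).2

-- expand_basin; the Nat fuel only guards totality (Python's recursion depth is bounded by
-- the number of cells, see expandA_fuel below: any fuel > freeCells gives the same value)
def expandA (input : List (List Int)) :
    Nat → Int × Int → List (Int × Int) → List (Int × Int) → List (Int × Int)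
  | 0, _, _, basin => basin
  | _ + 1, _, [], basin => basin
  | f + 1, p, d :: ds, basin =>
    let x2 := p.1 + d.1
    let y2 := p.2 + d.2
    if check_bounds x2 y2 input = false then expandA input (f + 1) p ds basin
    else if (x2, y2) ∈ basin ∨ gridAt input x2 y2 = 9 then expandA input (f + 1) p ds basin
    else if gridAt input x2 y2 > gridAt input p.1 p.2 then
      expandA input (f + 1) p ds (expandA input f (x2, y2) dirsA (basin ++ [(x2, y2)]))
    else expandA input (f + 1) p ds basin
  termination_by f _ dirs _ => (f, dirs.length)

def find_basins (input : List (List Int)) : List (List (List Int)) :=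
  let lows := find_lowest_points input
  let basins := lows.foldl (fun acc p => acc ++ [expandA input (pvFuel input) p dirsA [p]]) []
  basins.map (fun b => b.map (fun q => [q.1, q.2]))   -- (x, y) tuples encoded as [x, y]

-- ===== PORT B =====
def isLow (input : List (List Int)) (x y n : Int) : Bool :=
  dirsA.all (fun d =>
    !check_bounds (x + d.1) (y + d.2) input || decide (n < gridAt input (x + d.1) (y + d.2)))

def find_lowest_alt (input : List (List Int)) : List (Int × Int) :=
  (PySem.List.enumerate input).flatMap (fun r =>
    (PySem.List.enumerate r.2).filterMap (fun c =>
      if isLow input c.1 r.1 c.2 then some (c.1, r.1) else none))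

-- the while loop over the explicit stack of (cell, remaining directions) frames
def expandB (input : List (List Int)) :
    List ((Int × Int) × List (Int × Int)) → List (Int × Int) → List (Int × Int)
  | [], basin => basin
  | (_, []) :: rest, basin => expandB input rest basin
  | (p, d :: rem) :: rest, basin =>
    let q : Int × Int := (p.1 + d.1, p.2 + d.2)
    if h : check_bounds q.1 q.2 input = true ∧ q ∉ basin ∧ gridAt input q.1 q.2 ≠ 9 ∧
        gridAt input p.1 p.2 < gridAt input q.1 q.2 then
      expandB input ((q, dirsA) :: (p, rem) :: rest) (basin ++ [q])
    else
      expandB input ((p, rem) :: rest) basin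
  termination_by stack basin =>
    freeCells input basin * 6 + (stack.map (fun fr => fr.2.length)).sum + stack.length
  decreasing_by
  all_goals simp [dirsA]
  have hlt : freeCells input (basin ++ [(p.1 + d.1, p.2 + d.2)]) < freeCells input basin :=
    freeCells_append_lt input (p.1 + d.1, p.2 + d.2) basin h.1 h.2.1
  omega

def find_basins_alt (input : List (List Int)) : List (List (List Int)) :=
  (find_lowest_alt input).map (fun p =>
    (expandB input [(p, dirsA)] [p]).map (fun q => [q.1, q.2]))

-- ===== PRECONDITION & SPEC =====
def Spec_find_basins (input : List (List Int)) (out : List (List (List Int))) : Prop := out = find_basins_alt input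
instance (input : List (List Int)) (out : List (List (List Int))) : Decidable (Spec_find_basins input out) := by unfold Spec_find_basins; infer_instance

-- ===== CLAIM (what is proved, stated in full; the proofs are below) =====
def Claim_equal_find_basins : Prop := ∀ (input : List (List Int)), Dom_find_basins input → Spec_find_basins input (find_basins input)

-- ===== LEMMAS AND PROOFS =====

theorem freeCells_append_le (input : List (List Int)) (b t : List (Int × Int)) :
    freeCells input (b ++ t) ≤ freeCells input b := by
  unfold freeCells
  have hsub : List.Sublist ((allCells input).filter (fun z => decide (z ∉ b ++ t)))
      ((allCells input).filter (fun z => decide (z ∉ b))) := by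
    apply List.monotone_filter_right
    intro z hz
    simp only [decide_eq_true_eq, List.mem_append, not_or] at *
    exact hz.1
  exact hsub.length_le

-- unfolding equations for expandA
theorem expandA_nil (input : List (List Int)) (f : Nat) (p : Int × Int) (b : List (Int × Int)) :
    expandA input (f + 1) p [] b = b := by rw [expandA.eq_def]

theorem expandA_cons (input : List (List Int)) (f : Nat) (p d : Int × Int)
    (ds basin : List (Int × Int)) :
    expandA input (f + 1) p (d :: ds) basin =
      (if check_bounds (p.1 + d.1) (p.2 + d.2) input = false then expandA input (f + 1) p ds basin
      else if (p.1 + d.1, p.2 + d.2) ∈ basin ∨ gridAt input (p.1 + d.1) (p.2 + d.2) = 9 then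
        expandA input (f + 1) p ds basin
      else if gridAt input (p.1 + d.1) (p.2 + d.2) > gridAt input p.1 p.2 then
        expandA input (f + 1) p ds
          (expandA input f (p.1 + d.1, p.2 + d.2) dirsA (basin ++ [(p.1 + d.1, p.2 + d.2)]))
      else expandA input (f + 1) p ds basin) := by
  rw [expandA.eq_def]

-- expandA only ever appends to the basin
theorem expandA_prefix (input : List (List Int)) :
    ∀ (f : Nat) (p : Int × Int) (dirs : List (Int × Int)) (b : List (Int × Int)),
      ∃ t, expandA input f p dirs b = b ++ t := by
  intro f p dirs b
  fun_induction expandA input f p dirs b with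
  | case1 => exact ⟨[], by simp⟩
  | case2 => exact ⟨[], by simp⟩
  | case3 f p d ds basin x2 y2 hB ih => exact ih
  | case4 f p d ds basin x2 y2 hB hM ih => exact ih
  | case5 f p d ds basin x2 y2 hB hM hG ih1 ih1x ih2 =>
    obtain ⟨t1, ht1⟩ := ih1
    obtain ⟨t2, ht2⟩ := ih2
    exact ⟨(p.1 + d.1, p.2 + d.2) :: (t1 ++ t2), by rw [ht2, ht1]; simp only [List.append_assoc, List.singleton_append, List.cons_append]; rfl⟩
  | case6 f p d ds basin x2 y2 hB hM hG ih => exact ih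

-- any fuel strictly above freeCells gives the same value (so Python's unbounded recursion is matched)
theorem expandA_fuel (input : List (List Int)) :
    ∀ (f : Nat) (dirs : List (Int × Int)) (g : Nat) (p : Int × Int) (b : List (Int × Int)),
      freeCells input b < f → freeCells input b < g →
      expandA input f p dirs b = expandA input g p dirs b := by
  intro f
  induction f using Nat.strong_induction_on with
  | _ f IHf =>
  intro dirs
  induction dirs with
  | nil =>
    intro g p b hf hg
    obtain ⟨f', rfl⟩ : ∃ f', f = f' + 1 := ⟨f - 1, by omega⟩
    obtain ⟨g', rfl⟩ : ∃ g', g = g' + 1 := ⟨g - 1, by omega⟩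
    rw [expandA_nil, expandA_nil]
  | cons d ds IHds =>
    intro g p b hf hg
    obtain ⟨f', rfl⟩ : ∃ f', f = f' + 1 := ⟨f - 1, by omega⟩
    obtain ⟨g', rfl⟩ : ∃ g', g = g' + 1 := ⟨g - 1, by omega⟩
    rw [expandA_cons, expandA_cons]
    by_cases hB : check_bounds (p.1 + d.1) (p.2 + d.2) input = false
    · rw [if_pos hB, if_pos hB]; exact IHds _ p b hf hg
    · rw [if_neg hB, if_neg hB]
      by_cases hM : ((p.1 + d.1, p.2 + d.2) ∈ b ∨ gridAt input (p.1 + d.1) (p.2 + d.2) = 9)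
      · rw [if_pos hM, if_pos hM]; exact IHds _ p b hf hg
      · rw [if_neg hM, if_neg hM]
        by_cases hG : gridAt input (p.1 + d.1) (p.2 + d.2) > gridAt input p.1 p.2
        · rw [if_pos hG, if_pos hG]
          have hBt : check_bounds (p.1 + d.1) (p.2 + d.2) input = true := by
            revert hB; cases check_bounds (p.1 + d.1) (p.2 + d.2) input <;> simp
          have hq : (p.1 + d.1, p.2 + d.2) ∉ b := fun hmem => hM (Or.inl hmem)
          have hlt : freeCells input (b ++ [(p.1 + d.1, p.2 + d.2)]) < freeCells input b :=
            freeCells_append_lt input _ b hBt hq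
          have h1 : expandA input f' (p.1 + d.1, p.2 + d.2) dirsA (b ++ [(p.1 + d.1, p.2 + d.2)])
              = expandA input g' (p.1 + d.1, p.2 + d.2) dirsA (b ++ [(p.1 + d.1, p.2 + d.2)]) :=
            IHf f' (by omega) dirsA g' _ _ (by omega) (by omega)
          rw [h1]
          obtain ⟨t, ht⟩ :=
            expandA_prefix input g' (p.1 + d.1, p.2 + d.2) dirsA (b ++ [(p.1 + d.1, p.2 + d.2)])
          have hr : freeCells input
              (expandA input g' (p.1 + d.1, p.2 + d.2) dirsA (b ++ [(p.1 + d.1, p.2 + d.2)]))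
              ≤ freeCells input (b ++ [(p.1 + d.1, p.2 + d.2)]) := by
            rw [ht]; exact freeCells_append_le input _ t
          exact IHds _ p _ (by omega) (by omega)
        · rw [if_neg hG, if_neg hG]; exact IHds _ p b hf hg

-- denotation of a stack: run each frame's remaining directions as a recursive expansion
def runStack (input : List (List Int)) :
    List ((Int × Int) × List (Int × Int)) → List (Int × Int) → List (Int × Int)
  | [], b => b
  | (p, rem) :: rest, b => runStack input rest (expandA input (freeCells input b + 1) p rem b)

theorem expandB_run (input : List (List Int)) :
    ∀ (stack : List ((Int × Int) × List (Int × Int))) (b : List (Int × Int)),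
      expandB input stack b = runStack input stack b := by
  intro stack b
  fun_induction expandB input stack b with
  | case1 b => simp [runStack]
  | case2 p rest b ih =>
    rw [ih]
    simp [runStack, expandA_nil]
  | case3 p d rem rest basin q h ih =>
    rw [ih]
    have hBt : check_bounds (p.1 + d.1) (p.2 + d.2) input = true := h.1
    have hq : (p.1 + d.1, p.2 + d.2) ∉ basin := h.2.1
    have h9 : gridAt input (p.1 + d.1) (p.2 + d.2) ≠ 9 := h.2.2.1
    have hG : gridAt input p.1 p.2 < gridAt input (p.1 + d.1) (p.2 + d.2) := h.2.2.2
    have hlt : freeCells input (basin ++ [(p.1 + d.1, p.2 + d.2)]) < freeCells input basin :=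
      freeCells_append_lt input _ basin hBt hq
    simp only [runStack]
    rw [expandA_cons]
    rw [if_neg (by simp [hBt]), if_neg (by simp; exact ⟨hq, h9⟩), if_pos hG]
    have e1 : expandA input (freeCells input basin) (p.1 + d.1, p.2 + d.2) dirsA
          (basin ++ [(p.1 + d.1, p.2 + d.2)])
        = expandA input (freeCells input (basin ++ [(p.1 + d.1, p.2 + d.2)]) + 1)
            (p.1 + d.1, p.2 + d.2) dirsA (basin ++ [(p.1 + d.1, p.2 + d.2)]) :=
      expandA_fuel input _ _ _ _ _ (by omega) (by omega)
    rw [e1]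
    obtain ⟨t, ht⟩ := expandA_prefix input
      (freeCells input (basin ++ [(p.1 + d.1, p.2 + d.2)]) + 1) (p.1 + d.1, p.2 + d.2) dirsA
      (basin ++ [(p.1 + d.1, p.2 + d.2)])
    have hr : freeCells input (expandA input
          (freeCells input (basin ++ [(p.1 + d.1, p.2 + d.2)]) + 1) (p.1 + d.1, p.2 + d.2) dirsA
          (basin ++ [(p.1 + d.1, p.2 + d.2)]))
        ≤ freeCells input (basin ++ [(p.1 + d.1, p.2 + d.2)]) := by
      rw [ht]; exact freeCells_append_le input _ t
    exact congrArg (runStack input rest)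
      (expandA_fuel input (freeCells input (expandA input (freeCells input (basin ++ [(p.1 + d.1, p.2 + d.2)]) + 1)
        (p.1 + d.1, p.2 + d.2) dirsA (basin ++ [(p.1 + d.1, p.2 + d.2)])) + 1) rem
        (freeCells input basin + 1) p (expandA input (freeCells input (basin ++ [(p.1 + d.1, p.2 + d.2)]) + 1)
        (p.1 + d.1, p.2 + d.2) dirsA (basin ++ [(p.1 + d.1, p.2 + d.2)])) (by omega) (by omega))
  | case4 p d rem rest basin q h ih =>
    rw [ih]
    simp only [runStack]
    rw [expandA_cons]
    by_cases hB : check_bounds (p.1 + d.1) (p.2 + d.2) input = false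
    · rw [if_pos hB]
    · rw [if_neg hB]
      by_cases hM : ((p.1 + d.1, p.2 + d.2) ∈ basin ∨ gridAt input (p.1 + d.1) (p.2 + d.2) = 9)
      · rw [if_pos hM]
      · rw [if_neg hM]
        have hG : ¬ gridAt input (p.1 + d.1) (p.2 + d.2) > gridAt input p.1 p.2 := by
          intro hg
          exact h ⟨by revert hB; cases check_bounds (p.1 + d.1) (p.2 + d.2) input <;> simp,
            fun hm => hM (Or.inl hm), fun h9 => hM (Or.inr h9), hg⟩
        rw [if_neg hG]

-- visited cells always have a strictly smaller in-bounds neighbour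
def Vinv (input : List (List Int)) (v : List (Int × Int)) : Prop :=
  ∀ q ∈ v, ∃ d ∈ dirsA, check_bounds (q.1 + d.1) (q.2 + d.2) input = true ∧
    gridAt input (q.1 + d.1) (q.2 + d.2) < gridAt input q.1 q.2

theorem isLow_false_of_visited (input : List (List Int)) (v : List (Int × Int))
    (hv : Vinv input v) (q : Int × Int) (hq : q ∈ v) :
    isLow input q.1 q.2 (gridAt input q.1 q.2) = false := by
  obtain ⟨d, hd, hbt, hlt⟩ := hv q hq
  apply List.all_eq_false.mpr
  exact ⟨d, hd, by simp [hbt]; omega⟩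

theorem allCheck_fst (x y n : Int) (input : List (List Int)) :
    ∀ (dirs : List (Int × Int)) (v : List (Int × Int)),
      (allCheck x y n input dirs v).1 = dirs.all (fun d =>
        !check_bounds (x + d.1) (y + d.2) input ||
          decide (n < gridAt input (x + d.1) (y + d.2))) := by
  intro dirs
  induction dirs with
  | nil => intro v; simp [allCheck]
  | cons d ds ih =>
    intro v
    simp only [allCheck, check_neighbors, List.all_cons]
    by_cases hB : check_bounds (x + d.1) (y + d.2) input = false
    · simp [hB, ih]
    · have hBt : check_bounds (x + d.1) (y + d.2) input = true := by
        revert hB; cases check_bounds (x + d.1) (y + d.2) input <;> simp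
      by_cases hg : gridAt input (x + d.1) (y + d.2) > n
      · simp [hBt, hg, ih]
      · simp [hBt, hg]

theorem allCheck_inv (input : List (List Int)) (x y : Int)
    (hb : check_bounds x y input = true) :
    ∀ (dirs : List (Int × Int)) (v : List (Int × Int)),
      Vinv input v → (∀ d ∈ dirs, (-d.1, -d.2) ∈ dirsA) →
      Vinv input (allCheck x y (gridAt input x y) input dirs v).2 := by
  intro dirs
  induction dirs with
  | nil => intro v hv _; exact hv
  | cons d ds ih =>
    intro v hv hneg
    simp only [allCheck, check_neighbors]
    by_cases hB : check_bounds (x + d.1) (y + d.2) input = false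
    · simp only [hB, if_true, if_pos rfl]
      exact ih v hv (fun e he => hneg e (List.mem_cons_of_mem d he))
    · have hBt : check_bounds (x + d.1) (y + d.2) input = true := by
        revert hB; cases check_bounds (x + d.1) (y + d.2) input <;> simp
      by_cases hg : gridAt input (x + d.1) (y + d.2) > gridAt input x y
      · simp only [hBt, Bool.false_eq_true, if_false, hg, decide_true, if_true, if_pos]
        apply ih _ _ (fun e he => hneg e (List.mem_cons_of_mem d he))
        intro q hqmem
        rcases List.mem_append.mp hqmem with hold | hnew
        · exact hv q hold
        · have hq : q = (x + d.1, y + d.2) := by simpa using hnew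
          subst hq
          refine ⟨(-d.1, -d.2), hneg d (List.mem_cons_self), ?_, ?_⟩
          · show check_bounds (x + d.1 + -d.1) (y + d.2 + -d.2) input = true
            have e1 : x + d.1 + -d.1 = x := by ring
            have e2 : y + d.2 + -d.2 = y := by ring
            rw [e1, e2]; exact hb
          · have e1 : (x + d.1, y + d.2).1 + -d.1 = x := by simp
            have e2 : (x + d.1, y + d.2).2 + -d.2 = y := by simp
            rw [e1, e2]; exact hg
      · simp only [hBt, Bool.false_eq_true, if_false, hg, decide_false]
        simpa using hv

theorem cellsLoop (input : List (List Int)) (y : Int) :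
    ∀ (cells : List (Int × Int)) (v lows : List (Int × Int)),
      (∀ c ∈ cells, check_bounds c.1 y input = true ∧ c.2 = gridAt input c.1 y) →
      Vinv input v →
      (cells.foldl (cellStep input y) (v, lows)).2
        = lows ++ cells.filterMap (fun c => if isLow input c.1 y c.2 then some (c.1, y) else none)
      ∧ Vinv input (cells.foldl (cellStep input y) (v, lows)).1 := by
  intro cells
  induction cells with
  | nil => intro v lows _ hv; exact ⟨by simp, hv⟩
  | cons c cs ih =>
    intro v lows hfacts hv
    obtain ⟨hcb, hcn⟩ := hfacts c List.mem_cons_self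
    have hfacts' := fun e he => hfacts e (List.mem_cons_of_mem c he)
    rw [List.foldl_cons, List.filterMap_cons]
    by_cases hmem : (c.1, y) ∈ v
    · have hskip : cellStep input y (v, lows) c = (v, lows) := by
        simp [cellStep, hmem]
      have hlow : isLow input c.1 y c.2 = false := by
        rw [hcn]
        exact isLow_false_of_visited input v hv (c.1, y) hmem
      rw [hskip, hlow]
      simpa using ih v lows hfacts' hv
    · have hfst : (allCheck c.1 y c.2 input dirsA v).1 = isLow input c.1 y c.2 :=
        (allCheck_fst c.1 y c.2 input dirsA v).trans rfl
    
      have hinv : Vinv input (allCheck c.1 y c.2 input dirsA v).2 := by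
        rw [hcn]
        exact allCheck_inv input c.1 y hcb dirsA v hv (by decide)
      by_cases hlow : isLow input c.1 y c.2 = true
      · have hstep : cellStep input y (v, lows) c
            = ((allCheck c.1 y c.2 input dirsA v).2, lows ++ [(c.1, y)]) := by
          simp [cellStep, hmem, hfst, hlow]
        rw [hstep, hlow]
        obtain ⟨h1, h2⟩ := ih _ (lows ++ [(c.1, y)]) hfacts' hinv
        exact ⟨by rw [h1]; simp, h2⟩
      · have hlow' : isLow input c.1 y c.2 = false := by
          revert hlow; cases isLow input c.1 y c.2 <;> simp
        have hstep : cellStep input y (v, lows) c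
            = ((allCheck c.1 y c.2 input dirsA v).2, lows) := by
          simp [cellStep, hmem, hfst, hlow']
        rw [hstep, hlow']
        simpa using ih _ lows hfacts' hinv

theorem rowsLoop (input : List (List Int)) :
    ∀ (rows : List (Int × List Int)) (v lows : List (Int × Int)),
      (∀ r ∈ rows, 0 ≤ r.1 ∧ r.1 < (input.length : Int) ∧ r.2 = input.getD r.1.toNat []) →
      Vinv input v →
      (rows.foldl (fun st r => (PySem.List.enumerate r.2).foldl (cellStep input r.1) st) (v, lows)).2
        = lows ++ rows.flatMap (fun r => (PySem.List.enumerate r.2).filterMap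
            (fun c => if isLow input c.1 r.1 c.2 then some (c.1, r.1) else none))
      ∧ Vinv input
        (rows.foldl (fun st r => (PySem.List.enumerate r.2).foldl (cellStep input r.1) st)
          (v, lows)).1 := by
  intro rows
  induction rows with
  | nil => intro v lows _ hv; exact ⟨by simp, hv⟩
  | cons r rs ih =>
    intro v lows hfacts hv
    obtain ⟨hy0, hylen, hrow⟩ := hfacts r List.mem_cons_self
    have hfacts' := fun e he => hfacts e (List.mem_cons_of_mem r he)
    have hcells : ∀ c ∈ PySem.List.enumerate r.2,
        check_bounds c.1 r.1 input = true ∧ c.2 = gridAt input c.1 r.1 := by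
      intro c hc
      rw [PySem.List.mem_enumerate_iff] at hc
      obtain ⟨k, hk, rfl⟩ := hc
      have hrl : (input.getD r.1.toNat []).length = r.2.length := by rw [hrow]
      constructor
      · simp only [check_bounds, Bool.and_eq_true, decide_eq_true_eq]
        refine ⟨⟨⟨by omega, hy0⟩, hylen⟩, ?_⟩
        simp only [hrl]
        simp; omega
      · show r.2[k] = gridAt input (0 + (k : Int)) r.1
        simp only [gridAt, hrow]
        have : ((0 + (k : Int))).toNat = k := by omega
        rw [this, List.getD_eq_getElem _ _ (by omega : k < (input.getD r.1.toNat []).length)]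
    rw [List.foldl_cons, List.flatMap_cons]
    obtain ⟨h1, h2⟩ := cellsLoop input r.1 (PySem.List.enumerate r.2) v lows hcells hv
    obtain ⟨e, he⟩ : ∃ e, (PySem.List.enumerate r.2).foldl (cellStep input r.1) (v, lows) = e :=
      ⟨_, rfl⟩
    rw [he] at h1 h2 ⊢
    have hsu : e = (e.1, lows ++ (PySem.List.enumerate r.2).filterMap
        (fun c => if isLow input c.1 r.1 c.2 then some (c.1, r.1) else none)) := by
      rw [← h1]
    rw [hsu] at h2 ⊢
    obtain ⟨g1, g2⟩ := ih e.1 _ hfacts' h2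
    exact ⟨by rw [g1]; simp, g2⟩

theorem lows_eq (input : List (List Int)) :
    find_lowest_points input = find_lowest_alt input := by
  unfold find_lowest_points find_lowest_alt
  have hfacts : ∀ r ∈ PySem.List.enumerate input,
      0 ≤ r.1 ∧ r.1 < (input.length : Int) ∧ r.2 = input.getD r.1.toNat [] := by
    intro r hr
    rw [PySem.List.mem_enumerate_iff] at hr
    obtain ⟨k, hk, rfl⟩ := hr
    refine ⟨by simp, by simp; omega, ?_⟩
    show input[k] = input.getD ((0 : Int) + (k : Int)).toNat []
    have : ((0 : Int) + (k : Int)).toNat = k := by omega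
    rw [this, List.getD_eq_getElem _ _ hk]
  obtain ⟨h1, _⟩ := rowsLoop input (PySem.List.enumerate input) [] [] hfacts (by intro q hq; simp at hq)
  rw [h1]
  simp

theorem basin_eq (input : List (List Int)) (p : Int × Int) :
    expandA input (pvFuel input) p dirsA [p] = expandB input [(p, dirsA)] [p] := by
  rw [expandB_run]
  simp only [runStack]
  have hle : freeCells input [p] ≤ (allCells input).length := List.length_filter_le _ _
  exact expandA_fuel input (pvFuel input) dirsA (freeCells input [p] + 1) p [p]
    (by unfold pvFuel; omega) (by omega)

-- ===== VERDICT (by name: the statement is the Claim_ definition above) =====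
theorem find_basins_spec : Claim_equal_find_basins := by
  intro input _
  unfold Spec_find_basins find_basins find_basins_alt
  dsimp only
  rw [lows_eq]
  rw [PySem.List.foldl_append_singleton_eq_map]
  simp only [List.nil_append, List.map_map]
  apply List.map_congr_left
  intro p _
  simp [basin_eq]
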